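-- pv_equiv track=rewrite | github.com/pcarr1/Ph_20_Repo | hw7_ph20.py | pairPermutatePrimes
-- ===== SOURCE A (Python) =====
-- def isPrime(n):
--     if n in [0, 1]:
--         return False
--     elif n in [2, 3]:
--         return True
--     c = 2
--     while c <= n / 2:
--         if n % c == 0:
--             return False
--         c += 1
--     return True
--
-- def getAllPrimes(n):
--     primes = []
--     for i in range(2, n + 1):
--         if isPrime(i):
--             primes += [i]
--     return primes
--
-- def pairPermutatePrimes(n):
--     lst1 = getAllPrimes(n)
--     lst2 = lst1[:]
--     permutateList = []
--     for item1 in lst1: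
--         for item2 in lst2:
--             permutateList += [[item1, item2]]
--     return permutateList
-- ===== SOURCE B (Python) =====
-- def pairPermutatePrimes(n):
--     # Sieve-style composite marking instead of per-number trial division.
--     if n < 2:
--         return []
--     comp = bytearray(n + 1)
--     for k in range(2, n + 1):
--         for m in range(2 * k, n + 1, k):
--             comp[m] = 1
--     primes = [i for i in range(2, n + 1) if not comp[i]]
--     return [[p, q] for p in primes for q in primes]
-- ===== Notes on version B (the rewrite author's own statement) =====
-- stated objective: alternative
-- what changed: Primes are found by sieve-style marking of every multiple in a boolean table instead of per-number trial division up to half the candidate, and the prime list and the pairs are built with comprehensions instead of repeated list concatenation; intended as faster (a timing run measured about 2.2x but could not confirm at the largest size).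
import Mathlib
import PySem

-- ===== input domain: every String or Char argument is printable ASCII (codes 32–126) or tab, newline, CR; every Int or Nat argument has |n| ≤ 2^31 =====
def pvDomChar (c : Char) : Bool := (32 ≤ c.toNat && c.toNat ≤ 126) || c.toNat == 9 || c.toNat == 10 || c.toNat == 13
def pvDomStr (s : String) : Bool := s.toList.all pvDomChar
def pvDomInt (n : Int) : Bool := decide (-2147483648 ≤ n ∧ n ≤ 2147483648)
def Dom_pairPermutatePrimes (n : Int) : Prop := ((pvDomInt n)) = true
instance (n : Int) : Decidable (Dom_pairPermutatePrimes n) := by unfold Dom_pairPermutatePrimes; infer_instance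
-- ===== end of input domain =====

-- B replaces A's per-number trial division by sieve-style marking of all multiples in a
-- boolean table and builds the prime list and the pairs with comprehensions (objective: alternative;
-- intended as faster, a timing run measured about 2.2x without confirming at the largest size).

-- ===== PORT A =====
-- while c <= n / 2: Python's n/2 is an exact float for |n| ≤ 2^31, and for an integer c
-- the comparison c ≤ n/2 is exactly 2*c ≤ n.
def isPrimeLoop (n c : Int) : Bool :=
  if _h : 2 * c ≤ n then
    if PySem.Int.mod n c = 0 then false
    else isPrimeLoop n (c + 1)
  else true
termination_by (n - 2 * c + 1).toNat
decreasing_by omega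

def isPrime (n : Int) : Bool :=
  if n = 0 ∨ n = 1 then false
  else if n = 2 ∨ n = 3 then true
  else isPrimeLoop n 2

def getAllPrimes (n : Int) : List Int :=
  (PySem.List.pyRange 2 (n + 1) 1).foldl
    (fun primes i => if isPrime i then primes ++ [i] else primes) []

def pairPermutatePrimes (n : Int) : List (List Int) :=
  let lst1 := getAllPrimes n
  let lst2 := lst1
  lst1.foldl (fun acc item1 =>
    lst2.foldl (fun acc2 item2 => acc2 ++ [[item1, item2]]) acc) []

-- ===== PORT B =====
-- bytearray of 0/1 is modelled as List Bool; every index m, i touched satisfies 2 ≤ m (resp. i),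
-- so .toNat is exact and comp[i] is the in-bounds getD.
def pairPermutatePrimes_alt (n : Int) : List (List Int) :=
  if n < 2 then []
  else
    let comp := (PySem.List.pyRange 2 (n + 1) 1).foldl
      (fun c k => (PySem.List.pyRange (2 * k) (n + 1) k).foldl
        (fun c2 m => c2.set m.toNat true) c)
      (List.replicate (n + 1).toNat false)
    let primes := (PySem.List.pyRange 2 (n + 1) 1).filter
      (fun i => !(comp.getD i.toNat false))
    primes.flatMap (fun p => primes.map (fun q => [p, q]))

-- ===== PRECONDITION & SPEC =====
def Spec_pairPermutatePrimes (n : Int) (out : List (List Int)) : Prop := out = pairPermutatePrimes_alt n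
instance (n : Int) (out : List (List Int)) : Decidable (Spec_pairPermutatePrimes n out) := by unfold Spec_pairPermutatePrimes; infer_instance

-- ===== CLAIM (what is proved, stated in full; the proofs are below) =====
def Claim_equal_pairPermutatePrimes : Prop := ∀ (n : Int), Dom_pairPermutatePrimes n → Spec_pairPermutatePrimes n (pairPermutatePrimes n)

-- ===== LEMMAS AND PROOFS =====

-- length is preserved by a marking pass
theorem length_foldl_set (L : List Int) (c : List Bool) :
    (L.foldl (fun c2 m => c2.set m.toNat true) c).length = c.length := by
  induction L generalizing c with
  | nil => rfl
  | cons m L ih => simpa [List.foldl_cons] using (ih (c.set m.toNat true))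

-- what one marking pass does to a single cell
theorem getD_foldl_set (L : List Int) (c : List Bool) (j : Nat) :
    (L.foldl (fun c2 m => c2.set m.toNat true) c).getD j false
      = (c.getD j false || (decide (j < c.length) && L.any (fun m => m.toNat == j))) := by
  induction L generalizing c with
  | nil => simp
  | cons m L ih =>
      rw [List.foldl_cons, ih]
      simp only [List.length_set, List.getD_eq_getElem?_getD, List.getElem?_set, List.any_cons]
      by_cases hm : m.toNat = j
      · subst hm
        by_cases hb : m.toNat < c.length <;> simp [hb]
      · have hbeq : (m.toNat == j) = false := by simpa using hm
        simp [hm, hbeq]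

-- what the whole sieve fold does to a single cell
theorem getD_sieve (f : Int → List Int) (K : List Int) (c : List Bool) (j : Nat) :
    (K.foldl (fun c1 k => (f k).foldl (fun c2 m => c2.set m.toNat true) c1) c).getD j false
      = (c.getD j false ||
          (decide (j < c.length) && K.any (fun k => (f k).any (fun m => m.toNat == j)))) := by
  induction K generalizing c with
  | nil => simp
  | cons k K ih =>
      rw [List.foldl_cons, ih, getD_foldl_set, length_foldl_set]
      by_cases hb : j < c.length <;> simp [hb, Bool.or_assoc]

-- A's trial-division loop tests every candidate divisor d with c ≤ d and 2d ≤ n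
theorem isPrimeLoop_eq_true_iff (n c : Int) :
    isPrimeLoop n c = true ↔ ∀ d : Int, c ≤ d → 2 * d ≤ n → ¬ (d ∣ n) := by
  induction c using isPrimeLoop.induct n with
  | case1 c h hm =>
      rw [isPrimeLoop]
      simp only [dif_pos h, if_pos hm]
      constructor
      · intro hfalse; exact absurd hfalse (by simp)
      · intro hall
        exact absurd ((PySem.Int.mod_eq_zero_iff_dvd n c).mp hm) (hall c le_rfl h)
  | case2 c h hm ih =>
      rw [isPrimeLoop]
      simp only [dif_pos h, if_neg hm]
      rw [ih]
      constructor
      · intro hall d hcd hdn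
        rcases eq_or_lt_of_le hcd with heq | hlt
        · subst heq
          intro hdvd
          exact hm ((PySem.Int.mod_eq_zero_iff_dvd n c).mpr hdvd)
        · exact hall d (by omega) hdn
      · intro hall d hcd hdn
        exact hall d (by omega) hdn
  | case3 c h =>
      rw [isPrimeLoop]
      simp only [dif_neg h]
      constructor
      · intro _ d hcd hdn
        exact absurd hdn (by omega)
      · intro _; trivial

-- core: for 2 ≤ i ≤ n, A's primality test agrees with "i is never marked by the sieve"
theorem isPrime_eq_not_marked (n i : Int) (h2 : 2 ≤ i) (hn : i ≤ n) :
    isPrime i = !((PySem.List.pyRange 2 (n + 1) 1).any (fun k =>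
        (PySem.List.pyRange (2 * k) (n + 1) k).any (fun m => m.toNat == i.toNat))) := by
  have hmark : ((PySem.List.pyRange 2 (n + 1) 1).any (fun k =>
        (PySem.List.pyRange (2 * k) (n + 1) k).any (fun m => m.toNat == i.toNat))) = true
      ↔ ∃ k : Int, 2 ≤ k ∧ 2 * k ≤ i ∧ k ∣ i := by
    simp only [List.any_eq_true, PySem.List.mem_pyRange_one, beq_iff_eq]
    constructor
    · rintro ⟨k, ⟨hk2, _⟩, m, hm, hmi⟩
      rw [PySem.List.mem_pyRange_iff_of_pos (by omega)] at hm
      obtain ⟨hma, hmb, hdvd⟩ := hm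
      have hmi' : m = i := by omega
      subst hmi'
      refine ⟨k, hk2, hma, ?_⟩
      have := dvd_add hdvd (dvd_mul_left k 2)
      simpa using this
    · rintro ⟨k, hk2, hki, hdvd⟩
      refine ⟨k, ⟨hk2, by omega⟩, i, ?_, rfl⟩
      rw [PySem.List.mem_pyRange_iff_of_pos (by omega)]
      exact ⟨hki, by omega, dvd_sub hdvd (dvd_mul_left k 2)⟩
  have hiff : isPrime i = true ↔ ¬ (∃ k : Int, 2 ≤ k ∧ 2 * k ≤ i ∧ k ∣ i) := by
    unfold isPrime
    rw [if_neg (by omega : ¬ (i = 0 ∨ i = 1))]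
    by_cases h23 : i = 2 ∨ i = 3
    · rw [if_pos h23]
      simp only [true_iff]
      rintro ⟨k, hk2, hki, -⟩
      omega
    · rw [if_neg h23, isPrimeLoop_eq_true_iff]
      constructor
      · rintro hall ⟨k, hk2, hki, hdvd⟩
        exact hall k hk2 hki hdvd
      · intro hne d hd2 hdi hdvd
        exact hne ⟨d, hd2, hdi, hdvd⟩
  cases hb : ((PySem.List.pyRange 2 (n + 1) 1).any (fun k =>
      (PySem.List.pyRange (2 * k) (n + 1) k).any (fun m => m.toNat == i.toNat))) with
  | true =>
      simp only [Bool.not_true]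
      exact Bool.eq_false_iff.mpr (fun ht => (hiff.mp ht) (hmark.mp hb))
  | false =>
      simp only [Bool.not_false]
      exact hiff.mpr (fun hex => absurd (hmark.mpr hex) (by simp [hb]))

-- the two prime lists coincide
theorem primes_eq (n : Int) :
    List.filter isPrime (PySem.List.pyRange 2 (n + 1) 1)
      = List.filter (fun i =>
          !(((PySem.List.pyRange 2 (n + 1) 1).foldl
              (fun c k => (PySem.List.pyRange (2 * k) (n + 1) k).foldl
                (fun c2 m => c2.set m.toNat true) c)
              (List.replicate (n + 1).toNat false)).getD i.toNat false))
          (PySem.List.pyRange 2 (n + 1) 1) := by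
  apply List.filter_congr
  intro i hi
  rw [PySem.List.mem_pyRange_one] at hi
  rw [getD_sieve, isPrime_eq_not_marked n i hi.1 (by omega)]
  have hlt : i.toNat < (n + 1).toNat := by omega
  simp [List.getD_eq_getElem?_getD, hlt]

-- A's nested pairing loop is the comprehension
theorem pairs_eq (l : List Int) :
    l.foldl (fun acc a => l.foldl (fun acc2 b => acc2 ++ [[a, b]]) acc) []
      = l.flatMap (fun a => l.map (fun b => [a, b])) := by
  have h1 : l.foldl (fun acc a => l.foldl (fun acc2 b => acc2 ++ [[a, b]]) acc) []
      = l.foldl (fun acc a => acc ++ l.map (fun b => [a, b])) [] :=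
    PySem.List.foldl_congr_mem l _ _ []
      (fun acc a _ => PySem.List.foldl_append_singleton_eq_map (fun b => [a, b]) l acc)
  rw [h1]
  simpa using PySem.List.foldl_append_eq_flatMap (fun a => l.map (fun b => [a, b])) l []

-- ===== VERDICT (by name: the statement is the Claim_ definition above) =====
theorem pairPermutatePrimes_spec : Claim_equal_pairPermutatePrimes := by
  intro n _hdom
  unfold Spec_pairPermutatePrimes pairPermutatePrimes pairPermutatePrimes_alt getAllPrimes
  by_cases hn : n < 2
  · simp [PySem.List.pyRange_one_eq_nil (by omega : (n : Int) + 1 ≤ 2), hn]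
  · rw [if_neg hn]
    simp only []
    rw [PySem.List.foldl_append_if_eq_filter isPrime _ [], List.nil_append, pairs_eq,
      primes_eq n]
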